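-- pv_equiv track=rewrite | github.com/Kuroidaka/loitering_detect_imou | detect/behavior.py | compute_curl_count
-- ===== SOURCE A (Python) =====
-- from typing import List, Dict, Tuple, Any
--
-- def compute_curl_count(
--
--     history: List[Tuple[int, int]],
--     min_turn_frames: int = 3
-- ) -> int:
--     """
--     Count how many times the tracked path 'curls' (turns one way then back).
--     - history: list of (x,y) points
--     - min_turn_frames: minimum consecutive frames to treat as a valid turn segment
--     """
--
--     n = len(history)
--     if n < 3:
--         return 0
--
--     # 1) Compute signed 'turn' for each triplet
--     signs = []
--     for i in range(n - 2):
--         (x0, y0), (x1, y1), (x2, y2) = history[i], history[i+1], history[i+2]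
--         cross = (x1-x0)*(y2-y1) - (y1-y0)*(x2-x1)
--         if cross > 0:
--             signs.append( 1)   # left turn
--         elif cross < 0:
--             signs.append(-1)   # right turn
--         else:
--             signs.append( 0)   # straight / noise
--
--     # 2) Compress into segments of the same sign (ignore zeros)
--     segments = []
--     curr_sign = signs[0]
--     length = 1
--     for s in signs[1:]:
--         if s == curr_sign:
--             length += 1
--         else:
--             if curr_sign != 0 and length >= min_turn_frames:
--                 segments.append(curr_sign)
--             curr_sign = s
--             length = 1
--     # last segment
--     if curr_sign != 0 and length >= min_turn_frames:
--         segments.append(curr_sign)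
--
--     # 3) Count sign-flips → each flip is half a curl
--     flips = sum(1 for a, b in zip(segments, segments[1:]) if a != b)
--     # full curls ≈ flips//2
--     return flips // 2
-- ===== SOURCE B (Python) =====
-- from typing import List, Tuple
--
-- def compute_curl_count(
--     history: List[Tuple[int, int]],
--     min_turn_frames: int = 3
-- ) -> int:
--     n = len(history)
--     if n < 3:
--         return 0
--     cur_sign = None   # sign of the run currently being scanned (None before the first triplet)
--     run_len = 0
--     last = None       # sign of the last committed segment
--     flips = 0
--     for i in range(n - 2):
--         (x0, y0), (x1, y1), (x2, y2) = history[i], history[i+1], history[i+2]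
--         cross = (x1 - x0) * (y2 - y1) - (y1 - y0) * (x2 - x1)
--         s = (cross > 0) - (cross < 0)
--         if s == cur_sign:
--             run_len += 1
--         else:
--             if cur_sign is not None and cur_sign != 0 and run_len >= min_turn_frames:
--                 if last is not None and last != cur_sign:
--                     flips += 1
--                 last = cur_sign
--             cur_sign = s
--             run_len = 1
--     if cur_sign != 0 and run_len >= min_turn_frames and last is not None and last != cur_sign:
--         flips += 1
--     return flips // 2
-- ===== Notes on version B (the rewrite author's own statement) =====
-- stated objective: simpler
-- what changed: Single pass that computes each cross-product sign on the fly and keeps only (current run sign/length, last committed sign, flip counter), never materialising the signs or segments lists.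
import Mathlib
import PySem

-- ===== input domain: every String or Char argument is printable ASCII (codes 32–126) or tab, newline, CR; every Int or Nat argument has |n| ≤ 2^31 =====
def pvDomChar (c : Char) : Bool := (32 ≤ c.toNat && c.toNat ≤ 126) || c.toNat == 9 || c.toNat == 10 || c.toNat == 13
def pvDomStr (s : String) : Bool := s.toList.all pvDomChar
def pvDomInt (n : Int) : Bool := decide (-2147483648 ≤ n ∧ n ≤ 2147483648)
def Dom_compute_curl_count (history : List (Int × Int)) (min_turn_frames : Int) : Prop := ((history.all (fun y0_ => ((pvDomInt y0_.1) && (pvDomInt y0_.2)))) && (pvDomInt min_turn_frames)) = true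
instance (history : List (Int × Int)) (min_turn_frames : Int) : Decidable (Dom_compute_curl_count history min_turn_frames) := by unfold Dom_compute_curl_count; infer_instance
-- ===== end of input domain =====

-- B replaces A's three passes (signs list, segments list, zip-count) by one pass keeping only
-- (current run sign/length, last committed sign, flip counter): same return value, no intermediate lists.

-- ===== PORT A =====
-- body of A's step-1 loop: signed turn of the triplet at index i (indices are in range whenever A evaluates it)
def pvSignA (history : List (Int × Int)) (i : Int) : Int :=
  let p0 := PySem.List.pyGetD history i (0, 0)
  let p1 := PySem.List.pyGetD history (i + 1) (0, 0)
  let p2 := PySem.List.pyGetD history (i + 2) (0, 0)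
  let cross := (p1.1 - p0.1) * (p2.2 - p1.2) - (p1.2 - p0.2) * (p2.1 - p1.1)
  if cross > 0 then 1 else if cross < 0 then -1 else 0

-- body of A's step-2 loop; state = (segments, curr_sign, length)
def pvStepA (m : Int) (st : List Int × Int × Int) (s : Int) : List Int × Int × Int :=
  if s = st.2.1 then (st.1, st.2.1, st.2.2 + 1)
  else (if st.2.1 ≠ 0 ∧ st.2.2 ≥ m then st.1 ++ [st.2.1] else st.1, s, 1)

-- A's step 3: sum(1 for a, b in zip(segments, segments[1:]) if a != b)
def countFlips (l : List Int) : Int :=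
  ((l.zip l.tail).filter (fun p => p.1 ≠ p.2)).length

def compute_curl_count (history : List (Int × Int)) (min_turn_frames : Int) : Int :=
  let n : Int := history.length
  if n < 3 then 0
  else
    let signs : List Int := (PySem.List.pyRange 0 (n - 2) 1).map (pvSignA history)
    match signs with
    | [] => 0   -- unreachable: n ≥ 3 makes signs nonempty, so Python's signs[0] never raises
    | s0 :: rest =>
      let st := rest.foldl (pvStepA min_turn_frames) ([], s0, 1)
      let segments := if st.2.1 ≠ 0 ∧ st.2.2 ≥ min_turn_frames then st.1 ++ [st.2.1] else st.1
      let flips : Int := countFlips segments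
      PySem.Int.floordiv flips 2

-- ===== PORT B =====
-- B's on-the-fly sign:  s = (cross > 0) - (cross < 0)
def pvSignB (history : List (Int × Int)) (i : Int) : Int :=
  let p0 := PySem.List.pyGetD history i (0, 0)
  let p1 := PySem.List.pyGetD history (i + 1) (0, 0)
  let p2 := PySem.List.pyGetD history (i + 2) (0, 0)
  let cross := (p1.1 - p0.1) * (p2.2 - p1.2) - (p1.2 - p0.2) * (p2.1 - p1.1)
  (if cross > 0 then 1 else 0) - (if cross < 0 then 1 else 0)

-- B's single-pass loop body; state = (cur_sign, run_len, last, flips)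
def pvStepB (m : Int) (st : Option Int × Int × Option Int × Int) (s : Int) :
    Option Int × Int × Option Int × Int :=
  match st with
  | (cur, run, last, flips) =>
    if some s = cur then (cur, run + 1, last, flips)
    else
      match cur with
      | some c =>
        if c ≠ 0 ∧ run ≥ m then
          (some s, 1, some c,
            flips + (match last with | some l => if l ≠ c then 1 else 0 | none => 0))
        else (some s, 1, last, flips)
      | none => (some s, 1, last, flips)

def compute_curl_count_alt (history : List (Int × Int)) (min_turn_frames : Int) : Int :=
  let n : Int := history.length
  if n < 3 then 0
  else
    let st := (PySem.List.pyRange 0 (n - 2) 1).foldl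
      (fun st i => pvStepB min_turn_frames st (pvSignB history i)) (none, 0, none, 0)
    match st with
    | (cur, run, last, flips) =>
      let flips := if cur ≠ some 0 ∧ run ≥ min_turn_frames ∧ last ≠ none ∧ last ≠ cur
                   then flips + 1 else flips
      PySem.Int.floordiv flips 2

-- ===== PRECONDITION & SPEC =====
def Spec_compute_curl_count (history : List (Int × Int)) (min_turn_frames : Int) (out : Int) : Prop := out = compute_curl_count_alt history min_turn_frames
instance (history : List (Int × Int)) (min_turn_frames : Int) (out : Int) : Decidable (Spec_compute_curl_count history min_turn_frames out) := by unfold Spec_compute_curl_count; infer_instance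

-- ===== CLAIM (what is proved, stated in full; the proofs are below) =====
def Claim_equal_compute_curl_count : Prop := ∀ (history : List (Int × Int)) (min_turn_frames : Int), Dom_compute_curl_count history min_turn_frames → Spec_compute_curl_count history min_turn_frames (compute_curl_count history min_turn_frames)

-- ===== LEMMAS AND PROOFS =====

lemma pvSignB_eq (history : List (Int × Int)) (i : Int) :
    pvSignB history i = pvSignA history i := by
  simp only [pvSignA, pvSignB]
  split_ifs <;> omega

lemma countFlips_cons_cons (a b : Int) (l : List Int) :
    countFlips (a :: b :: l) = (if a = b then 0 else 1) + countFlips (b :: l) := by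
  by_cases hab : a = b
  · simp [countFlips, hab]
  · simp [countFlips, hab]; ring

lemma countFlips_concat : ∀ (l : List Int) (s : Int),
    countFlips (l ++ [s]) =
      countFlips l + (match l.getLast? with | none => 0 | some a => if a = s then 0 else 1) := by
  intro l
  induction l with
  | nil => intro s; simp [countFlips]
  | cons a t ih =>
    intro s
    cases t with
    | nil =>
      simp only [List.cons_append, List.nil_append, countFlips_cons_cons]
      simp [countFlips]
    | cons b t' =>
      simp only [List.cons_append] at ih ⊢
      rw [countFlips_cons_cons, ih s, countFlips_cons_cons]
      have hl : (a :: b :: t').getLast? = (b :: t').getLast? := by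
        simp [List.getLast?_cons_cons]
      rw [hl]; ring

-- the single-pass state tracks exactly (curr_sign, length, segments.getLast?, countFlips segments)
lemma foldB_sync (m : Int) : ∀ (L segs : List Int) (cs len : Int),
    L.foldl (pvStepB m) (some cs, len, segs.getLast?, countFlips segs)
      = (some (L.foldl (pvStepA m) (segs, cs, len)).2.1,
         (L.foldl (pvStepA m) (segs, cs, len)).2.2,
         (L.foldl (pvStepA m) (segs, cs, len)).1.getLast?,
         countFlips (L.foldl (pvStepA m) (segs, cs, len)).1) := by
  intro L
  induction L with
  | nil => intro segs cs len; rfl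
  | cons s L ih =>
    intro segs cs len
    by_cases hs : s = cs
    · subst hs
      have hB : pvStepB m (some s, len, segs.getLast?, countFlips segs) s
          = (some s, len + 1, segs.getLast?, countFlips segs) := by
        simp [pvStepB]
      have hA : pvStepA m (segs, s, len) s = (segs, s, len + 1) := by
        simp [pvStepA]
      simp only [List.foldl_cons, hB, hA]
      exact ih segs s (len + 1)
    · have hne : ¬ (some s = some cs) := by simpa using hs
      by_cases hc : cs ≠ 0 ∧ len ≥ m
      · have hB : pvStepB m (some cs, len, segs.getLast?, countFlips segs) s
            = (some s, 1, some cs,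
               countFlips segs +
                 (match segs.getLast? with | some l => if l ≠ cs then 1 else 0 | none => 0)) := by
          simp [pvStepB, hne, hc]
        have hA : pvStepA m (segs, cs, len) s = (segs ++ [cs], s, 1) := by
          simp [pvStepA, hs, hc]
        have hlast : some cs = (segs ++ [cs]).getLast? := by
          simp
        have hflip : countFlips segs +
              (match segs.getLast? with | some l => if l ≠ cs then 1 else 0 | none => 0)
            = countFlips (segs ++ [cs]) := by
          rw [countFlips_concat]
          cases h : segs.getLast? with
          | none => simp
          | some a => by_cases hac : a = cs <;> simp [hac]
        simp only [List.foldl_cons, hB, hA]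
        rw [hflip, hlast]
        exact ih (segs ++ [cs]) s 1
      · have hB : pvStepB m (some cs, len, segs.getLast?, countFlips segs) s
            = (some s, 1, segs.getLast?, countFlips segs) := by
          simp [pvStepB, hne, hc]
        have hA : pvStepA m (segs, cs, len) s = (segs, s, 1) := by
          simp [pvStepA, hs, hc]
        simp only [List.foldl_cons, hB, hA]
        exact ih segs s 1

-- final commit + flip count: A's step-3 value equals B's running counter after the trailing commit
lemma final_eq (m : Int) (segs : List Int) (cs len : Int) :
    countFlips (if cs ≠ 0 ∧ len ≥ m then segs ++ [cs] else segs)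
      = (if some cs ≠ some 0 ∧ len ≥ m ∧ segs.getLast? ≠ none ∧ segs.getLast? ≠ some cs
         then countFlips segs + 1 else countFlips segs) := by
  by_cases hc : cs ≠ 0 ∧ len ≥ m
  · rw [if_pos hc, countFlips_concat]
    cases h : segs.getLast? with
    | none => simp [hc]
    | some a =>
      by_cases hac : a = cs
      · simp [hac, hc]
      · have : some cs ≠ some 0 ∧ len ≥ m ∧ (some a : Option Int) ≠ none ∧ (some a : Option Int) ≠ some cs := by
          refine ⟨by simpa using hc.1, hc.2, by simp, by simpa using hac⟩
        rw [if_pos this]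
        simp [hac]
  · rw [if_neg hc, if_neg]
    rintro ⟨h1, h2, -, -⟩
    exact hc ⟨by simpa using h1, h2⟩

-- ===== VERDICT (by name: the statement is the Claim_ definition above) =====
theorem compute_curl_count_spec : Claim_equal_compute_curl_count := by
  intro history m _dom
  unfold Spec_compute_curl_count
  simp only [compute_curl_count, compute_curl_count_alt]
  by_cases hn : (history.length : Int) < 3
  · simp [hn]
  · simp only [hn, if_false]
    have h02 : (0 : Int) < (history.length : Int) - 2 := by omega
    -- B's fold over the index range = fold of pvStepB over A's signs list
    have hfold : ∀ (L : List Int),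
        L.foldl (fun st i => pvStepB m st (pvSignB history i))
            ((none : Option Int), (0 : Int), (none : Option Int), (0 : Int))
          = (L.map (pvSignA history)).foldl (pvStepB m) (none, 0, none, 0) := by
      intro L
      rw [List.foldl_map]
      simp only [pvSignB_eq]
    rw [hfold]
    rw [PySem.List.pyRange_one_cons h02]
    simp only [List.map_cons, zero_add]
    set s0 := pvSignA history 0 with hs0
    set rest := (PySem.List.pyRange 1 ((history.length : Int) - 2) 1).map (pvSignA history) with hrest
    have hfirst : pvStepB m (none, 0, none, 0) s0 = (some s0, 1, none, 0) := by
      simp [pvStepB]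
    rw [List.foldl_cons, hfirst]
    have hsync := foldB_sync m rest [] s0 1
    have h0 : countFlips ([] : List Int) = 0 := by simp [countFlips]
    simp only [List.getLast?_nil, h0] at hsync
    rw [hsync]
    rcases hst : rest.foldl (pvStepA m) ([], s0, 1) with ⟨segs, cs, len⟩
    simp only
    rw [final_eq]
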